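-- pv_equiv track=rewrite | github.com/Matias316/pyops-lab | metrics/metrics/uid_analyzer.py | analyze_uid_traffic
-- ===== SOURCE A (Python) =====
-- from collections import Counter, defaultdict
--
-- def analyze_uid_traffic(timestamps: list[int], uids: list[str], threshold: int) -> tuple[bool, int, bool]:
--     """
--     Args:
--         timestamps: List of UNIX timestamps in seconds when UIDs were generated.
--         uids: List of corresponding UIDs.
--         threshold: Maximum allowed UIDs per second.
--     Returns:
--         A tuple:
--           (has_duplicates: bool, max_rate: int, rate_exceeded: bool)
--     Example:
--         Inputs:
--             timestamps = [
--                 1749836642, 1749836642, 1749836642,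
--                 1749836643, 1749836643,
--                 1749836644,
--                 1749836645, 1749836645, 1749836645,
--                 1749836645
--             ]
--             uids = ["a", "b", "c", "d", "e", "f", "g", "h", "i", "a"]
--             threshold = 3
--
--         Output:
--             (False, 4, True)
--     """
--     if len(timestamps) != len(uids):
--         raise ValueError("Timestamps and UIDs list must match length")
--
--     if len(timestamps) < 0 or len(timestamps) != len(uids):
--         raise ValueError("Timestamps and UIDs list must match length and include at least 1 element")
--
--     # Counter returns a dictionary with unique values and ocurrences
--     # E.g. {'1749836642': 2, '1749836643': 1 }
--     timestamps_counts = Counter(timestamps)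
--
--     max_rate = max(timestamps_counts.values())
--     rate_exceeded = max_rate > threshold
--
--     uids_by_timestamp = defaultdict(set)
--     # Dictionary usign ts as key and a set (unique values) of uids
--     # E.g. {'1749836642': ['a'], '1749836643': ['a,b'] }
--     for ts, uid in zip(timestamps, uids):
--         uids_by_timestamp[ts].add(uid)
--
--     # If the set of unique values for a specific timestamp is less than count of timestamp
--     # then there were collisions, i.e., same uid for a same timestamp
--     collisions = any(len(uid_set) < timestamps_counts[ts]
--         for ts, uid_set in uids_by_timestamp.items()
--     )
--
--     return collisions, max_rate, rate_exceeded
-- ===== SOURCE B (Python) =====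
-- from collections import Counter
--
-- def analyze_uid_traffic(timestamps: list[int], uids: list[str], threshold: int) -> tuple[bool, int, bool]:
--     if len(timestamps) != len(uids):
--         raise ValueError("Timestamps and UIDs list must match length")
--     max_rate = max(Counter(timestamps).values())
--     collisions = len(set(zip(timestamps, uids))) != len(timestamps)
--     return collisions, max_rate, max_rate > threshold
-- ===== Notes on version B (the rewrite author's own statement) =====
-- stated objective: simpler
-- what changed: Replaces the defaultdict-of-sets per-timestamp grouping plus per-key size comparison with one global set of (timestamp, uid) pairs whose size is compared to the input length; the Counter/max rate computation is kept.
import Mathlib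
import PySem

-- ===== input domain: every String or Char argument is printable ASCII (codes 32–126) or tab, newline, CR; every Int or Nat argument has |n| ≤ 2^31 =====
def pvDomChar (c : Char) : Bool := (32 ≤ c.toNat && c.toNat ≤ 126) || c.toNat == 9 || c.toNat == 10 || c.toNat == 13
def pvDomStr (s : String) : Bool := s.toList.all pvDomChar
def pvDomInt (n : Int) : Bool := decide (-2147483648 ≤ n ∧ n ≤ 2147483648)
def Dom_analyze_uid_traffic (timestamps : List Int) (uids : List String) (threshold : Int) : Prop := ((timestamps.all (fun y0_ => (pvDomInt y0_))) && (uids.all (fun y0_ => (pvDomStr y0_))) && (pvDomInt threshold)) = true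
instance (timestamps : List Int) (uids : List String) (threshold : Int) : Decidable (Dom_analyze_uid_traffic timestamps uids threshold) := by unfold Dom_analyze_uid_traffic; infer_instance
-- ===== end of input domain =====

-- B keeps A's rate computation but detects collisions with one global set of
-- (timestamp, uid) pairs instead of a defaultdict of per-timestamp uid sets (objective: simpler).

-- ===== PORT A =====
def analyze_uid_traffic (timestamps : List Int) (uids : List String) (threshold : Int) : Bool × Int × Bool :=
  -- `Counter(timestamps)`
  let timestamps_counts := PySem.Dict.counter timestamps
  -- `max(timestamps_counts.values())` (raises ValueError on empty: Pre_ requires timestamps ≠ [])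
  let max_rate := (PySem.List.max? timestamps_counts.values (fun x => x)).getD 0
  let rate_exceeded := decide (max_rate > threshold)
  -- `for ts, uid in zip(timestamps, uids): uids_by_timestamp[ts].add(uid)`
  let uids_by_timestamp :=
    (List.zip timestamps uids).foldl
      (fun d p => d.modify p.1 PySem.Set.empty (fun s => PySem.Set.add s p.2))
      PySem.Dict.empty
  -- `any(len(uid_set) < timestamps_counts[ts] for ts, uid_set in uids_by_timestamp.items())`
  let collisions :=
    uids_by_timestamp.items.any
      (fun p => decide (PySem.Set.len p.2 < timestamps_counts.getD p.1 0))
  (collisions, max_rate, rate_exceeded)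

-- ===== PORT B =====
def analyze_uid_traffic_alt (timestamps : List Int) (uids : List String) (threshold : Int) : Bool × Int × Bool :=
  -- `max(Counter(timestamps).values())`
  let max_rate := (PySem.List.max? (PySem.Dict.counter timestamps).values (fun x => x)).getD 0
  -- `len(set(zip(timestamps, uids))) != len(timestamps)`
  let collisions :=
    decide (PySem.Set.len (PySem.Set.ofList (List.zip timestamps uids)) ≠ PySem.List.len timestamps)
  (collisions, max_rate, decide (max_rate > threshold))

-- ===== PRECONDITION & SPEC =====
-- Pre_ excludes exactly the inputs where A raises ValueError: mismatched lengths
-- (A's explicit raise) and the empty list (max() of an empty Counter).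
def Pre_analyze_uid_traffic (timestamps : List Int) (uids : List String) (threshold : Int) : Prop :=
  timestamps.length = uids.length ∧ timestamps ≠ []
instance (timestamps : List Int) (uids : List String) (threshold : Int) : Decidable (Pre_analyze_uid_traffic timestamps uids threshold) := by unfold Pre_analyze_uid_traffic; infer_instance

def pvWitness_analyze_uid_traffic : List Int × List String × Int := ([1, 1, 2], ["a", "a", "b"], 1)

def Spec_analyze_uid_traffic (timestamps : List Int) (uids : List String) (threshold : Int) (out : Bool × Int × Bool) : Prop := out = analyze_uid_traffic_alt timestamps uids threshold
instance (timestamps : List Int) (uids : List String) (threshold : Int) (out : Bool × Int × Bool) : Decidable (Spec_analyze_uid_traffic timestamps uids threshold out) := by unfold Spec_analyze_uid_traffic; infer_instance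

-- ===== CLAIM (what is proved, stated in full; the proofs are below) =====
def Claim_equal_analyze_uid_traffic : Prop := ∀ (timestamps : List Int) (uids : List String) (threshold : Int), Dom_analyze_uid_traffic timestamps uids threshold → Pre_analyze_uid_traffic timestamps uids threshold → Spec_analyze_uid_traffic timestamps uids threshold (analyze_uid_traffic timestamps uids threshold)

-- ===== LEMMAS AND PROOFS =====

-- folding Set.add only appends a Sublist of the folded list
theorem pv_foldl_add_split {α : Type} [BEq α] (xs : List α) (s : PySem.Set α) :
    ∃ t, xs.foldl PySem.Set.add s = s ++ t ∧ t.Sublist xs := by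
  induction xs generalizing s with
  | nil => exact ⟨[], by simp⟩
  | cons x xs ih =>
    simp only [List.foldl_cons]
    by_cases hc : List.contains s x = true
    · obtain ⟨t, ht, hs⟩ := ih s
      exact ⟨t, by simpa [PySem.Set.add, hc] using ht, hs.cons x⟩
    · obtain ⟨t, ht, hs⟩ := ih (s ++ [x])
      exact ⟨x :: t, by simpa [PySem.Set.add, hc] using ht, hs.cons₂ x⟩

theorem pv_length_ofList_eq_iff {α : Type} [BEq α] [LawfulBEq α] (xs : List α) :
    (PySem.Set.ofList xs).length = xs.length ↔ xs.Nodup := by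
  constructor
  · intro h
    obtain ⟨t, ht, hs⟩ := pv_foldl_add_split xs ([] : PySem.Set α)
    rw [PySem.Set.ofList_eq_foldl] at *
    have : t = xs := hs.eq_of_length (by simpa [ht] using h)
    have hn := PySem.Set.nodup_ofList (α := α) xs
    rw [PySem.Set.ofList_eq_foldl, ht, this] at hn
    simpa using hn
  · intro h; rw [PySem.Set.ofList_eq_self_of_nodup xs h]

-- occurrences of a uid in the ts-group are occurrences of the pair (ts, uid)
theorem pv_count_group {α β : Type} [BEq α] [LawfulBEq α] [BEq β] [LawfulBEq β]
    (L : List (α × β)) (k : α) (b : β) :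
    ((L.filter (fun p => p.1 == k)).map Prod.snd).count b = L.count (k, b) := by
  induction L with
  | nil => rfl
  | cons p L ih =>
    obtain ⟨a, c⟩ := p
    by_cases ha : a = k
    · subst ha
      by_cases hb : c = b
      · subst hb; simp [List.filter_cons, List.count_cons, ih]
      · simp [List.filter_cons, List.count_cons, ih, hb, Prod.ext_iff]
    · simp [List.filter_cons, List.count_cons, ih, ha, Prod.ext_iff]

theorem pv_nodup_iff_groups {α β : Type} [BEq α] [LawfulBEq α] [BEq β] [LawfulBEq β]
    (L : List (α × β)) :
    L.Nodup ↔ ∀ k : α, ((L.filter (fun p => p.1 == k)).map Prod.snd).Nodup := by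
  simp only [List.nodup_iff_count_le_one, pv_count_group]
  constructor
  · intro h k b; exact h (k, b)
  · intro h p; exact h p.1 p.2

-- the grouping fold: the entry at key k collects (by Set.add) the uids paired with k
theorem pv_getD_group (L : List (Int × String)) (d : PySem.Dict Int (PySem.Set String)) (k : Int) :
    (L.foldl (fun d p => d.modify p.1 PySem.Set.empty (fun s => PySem.Set.add s p.2)) d).getD k PySem.Set.empty
      = ((L.filter (fun p => p.1 == k)).map Prod.snd).foldl PySem.Set.add (d.getD k PySem.Set.empty) := by
  induction L generalizing d with
  | nil => rfl
  | cons p L ih =>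
    obtain ⟨a, c⟩ := p
    rw [List.foldl_cons, ih]
    by_cases ha : a = k
    · subst ha
      have h1 : (d.modify a PySem.Set.empty (fun s => PySem.Set.add s c)).getD a PySem.Set.empty
          = PySem.Set.add (d.getD a PySem.Set.empty) c := by
        rw [PySem.Dict.modify, PySem.Dict.getD_insert]; simp
      simp [List.filter_cons, h1]
    · have h1 : (d.modify a PySem.Set.empty (fun s => PySem.Set.add s c)).getD k PySem.Set.empty
          = d.getD k PySem.Set.empty := by
        rw [PySem.Dict.modify, PySem.Dict.getD_insert, if_neg (Ne.symm ha)]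
      simp only [PySem.Set.empty] at h1
      simp [List.filter_cons, h1, ha]

theorem pv_collisions_eq (timestamps : List Int) (uids : List String)
    (hlen : timestamps.length = uids.length) :
    ((List.zip timestamps uids).foldl
        (fun d p => d.modify p.1 PySem.Set.empty (fun s => PySem.Set.add s p.2))
        PySem.Dict.empty).items.any
      (fun p => decide (PySem.Set.len p.2 < (PySem.Dict.counter timestamps).getD p.1 0))
      = decide (PySem.Set.len (PySem.Set.ofList (List.zip timestamps uids)) ≠ PySem.List.len timestamps) := by
  rw [Bool.eq_iff_iff]
  set L := List.zip timestamps uids with hL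
  set fold := L.foldl
      (fun d p => d.modify p.1 PySem.Set.empty (fun s => PySem.Set.add s p.2))
      PySem.Dict.empty with hfold
  have hfst : L.map Prod.fst = timestamps := List.map_fst_zip (le_of_eq hlen)
  have hLlen : L.length = timestamps.length := by
    rw [hL, List.length_zip, hlen, min_self]
  -- strictly fewer distinct elements than elements ↔ duplicates
  have hstrict : ∀ {γ : Type} [inst : BEq γ] [LawfulBEq γ] (g : List γ),
      ((PySem.Set.ofList g).length < g.length ↔ ¬ g.Nodup) := by
    intro γ _ _ g
    rw [← pv_length_ofList_eq_iff]
    have := PySem.Set.length_ofList_le g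
    omega
  have hkeys : fold.keys = PySem.Set.ofList timestamps := by
    rw [hfold,
      PySem.Dict.keys_foldl_modify_key L Prod.fst PySem.Set.empty
        (fun _ p => fun s => PySem.Set.add s p.2) PySem.Dict.empty,
      PySem.Dict.keys_empty, PySem.Set.update_nil_left, hfst]
  have hnd : fold.keys.Nodup := by
    rw [hkeys]; exact PySem.Set.nodup_ofList timestamps
  have hgetD : ∀ k : Int, fold.getD k PySem.Set.empty
      = PySem.Set.ofList ((L.filter (fun p => p.1 == k)).map Prod.snd) := by
    intro k
    rw [hfold, pv_getD_group, PySem.Set.ofList_eq_foldl]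
    rfl
  rw [PySem.Dict.items_eq_map_keys fold hnd PySem.Set.empty, List.any_map, hkeys]
  simp only [Function.comp_def, List.any_eq_true, decide_eq_true_eq, hgetD,
    PySem.Set.mem_ofList, PySem.Dict.getD_counter, PySem.Set.len, PySem.List.len]
  have hmaplen : ∀ k : Int, ((L.filter (fun p => p.1 == k)).map Prod.snd).length
      = (L.filter (fun p => p.1 == k)).length := by
    intro k; simp
  have hcount : ∀ k : Int, timestamps.count k = (L.filter (fun p => p.1 == k)).length := by
    intro k
    rw [← hfst, ← List.countP_eq_length_filter, List.count_eq_countP, List.countP_map]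
    rfl
  constructor
  · rintro ⟨k, -, hklt⟩
    have hdup : ¬ ((L.filter (fun p => p.1 == k)).map Prod.snd).Nodup := by
      rw [← hstrict]
      have := hcount k
      have := hmaplen k
      omega
    have hnotL : ¬ L.Nodup := fun h => hdup ((pv_nodup_iff_groups L).mp h k)
    have := (hstrict (g := L)).mpr hnotL
    omega
  · intro hne
    have hnotL : ¬ L.Nodup := by
      rw [← hstrict]
      have := PySem.Set.length_ofList_le L
      omega
    obtain ⟨k, hk⟩ := not_forall.mp (fun h => hnotL ((pv_nodup_iff_groups L).mpr h))
    refine ⟨k, ?_, ?_⟩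
    · -- the group at k is nonempty, so k occurs in timestamps
      have hne2 : (L.filter (fun p => p.1 == k)).map Prod.snd ≠ [] := by
        intro h0; exact hk (by rw [h0]; exact List.nodup_nil)
      have : ∃ p ∈ L, (p.1 == k) = true := by
        rcases List.exists_mem_of_ne_nil _ hne2 with ⟨b, hb⟩
        rcases List.mem_map.mp hb with ⟨p, hp, -⟩
        exact ⟨p, (List.mem_filter.mp hp).1, (List.mem_filter.mp hp).2⟩
      rcases this with ⟨p, hpL, hpk⟩
      rw [← hfst]
      exact List.mem_map.mpr ⟨p, hpL, by simpa using hpk⟩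
    · have h1 := (hstrict (g := (L.filter (fun p => p.1 == k)).map Prod.snd)).mpr hk
      have h2 := hcount k
      have h3 := hmaplen k
      omega

-- ===== VERDICT (by name: the statement is the Claim_ definition above) =====
theorem analyze_uid_traffic_spec : Claim_equal_analyze_uid_traffic := by
  intro timestamps uids threshold _ hpre
  unfold Spec_analyze_uid_traffic analyze_uid_traffic analyze_uid_traffic_alt
  simp only [Prod.mk.injEq, and_true]
  exact pv_collisions_eq timestamps uids hpre.1
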